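-- pv_equiv track=rewrite | github.com/cseelhoff/garage | corrected_analysis.py | syms_to_int
-- ===== SOURCE A (Python) =====
-- SYM_TO_OCT = {1:0, 2:1, 3:2, 4:3, 5:4, 6:5, 7:6, 9:7}
--
-- def syms_to_int(syms, big_endian=True):
--     """Convert symbol list to integer using octal mapping."""
--     octals = []
--     for s in syms:
--         if s in SYM_TO_OCT:
--             octals.append(SYM_TO_OCT[s])
--         else:
--             return None  # invalid symbol
--     if not octals:
--         return None
--     if big_endian:
--         val = 0
--         for o in octals:
--             val = val * 8 + o
--         return val
--     else:
--         val = 0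
--         for i, o in enumerate(octals):
--             val += o * (8 ** i)
--         return val
-- ===== SOURCE B (Python) =====
-- SYM_TO_OCT = {1:0, 2:1, 3:2, 4:3, 5:4, 6:5, 7:6, 9:7}
--
-- def syms_to_int(syms, big_endian=True):
--     """Convert symbol list to integer using octal mapping."""
--     if not syms:
--         return None
--     val = 0
--     for s in (syms if big_endian else reversed(syms)):
--         d = SYM_TO_OCT.get(s)
--         if d is None:
--             return None
--         val = val * 8 + d
--     return val
-- ===== Notes on version B (the rewrite author's own statement) =====
-- stated objective: simpler
-- what changed: B fuses A's collect-then-convert two-phase design into one Horner pass over the input (reversed for little-endian), replacing A's separate powers-of-8 accumulation branch and intermediate octal list.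
import Mathlib
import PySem

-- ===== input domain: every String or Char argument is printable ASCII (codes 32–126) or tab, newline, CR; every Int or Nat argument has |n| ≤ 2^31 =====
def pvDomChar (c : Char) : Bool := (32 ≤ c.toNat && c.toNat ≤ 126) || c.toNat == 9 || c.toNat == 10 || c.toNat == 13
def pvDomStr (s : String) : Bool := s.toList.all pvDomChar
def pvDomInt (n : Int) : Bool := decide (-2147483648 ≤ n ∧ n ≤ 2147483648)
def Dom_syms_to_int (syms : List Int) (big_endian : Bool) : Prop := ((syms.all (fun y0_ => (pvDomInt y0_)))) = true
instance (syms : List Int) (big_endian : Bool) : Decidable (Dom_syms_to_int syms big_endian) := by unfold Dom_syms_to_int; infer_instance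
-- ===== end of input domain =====

-- B fuses A's collect-then-convert two-phase design into a single Horner pass (reversed input
-- for little-endian); same return value everywhere, objective: simpler.

-- ===== PORT A =====
def SYM_TO_OCT : PySem.Dict Int Int :=
  PySem.Dict.ofList [(1,0), (2,1), (3,2), (4,3), (5,4), (6,5), (7,6), (9,7)]

-- the 'for s in syms' collection loop with its early 'return None'
def pvCollectA (octals : List Int) : List Int → Option (List Int)
  | [] => some octals
  | s :: rest =>
    match SYM_TO_OCT.get? s with
    | some o => pvCollectA (octals ++ [o]) rest
    | none => none

def syms_to_int (syms : List Int) (big_endian : Bool) : Option Int :=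
  match pvCollectA [] syms with
  | none => none
  | some octals =>
    if octals = [] then none
    else if big_endian then
      some (octals.foldl (fun val o => val * 8 + o) 0)
    else
      some ((PySem.List.enumerate octals 0).foldl (fun val p => val + p.2 * 8 ^ p.1.toNat) 0)

-- ===== PORT B =====
-- the fused 'for s in order' Horner loop with its early 'return None'
def pvHornerB (val : Int) : List Int → Option Int
  | [] => some val
  | s :: rest =>
    match SYM_TO_OCT.get? s with
    | some d => pvHornerB (val * 8 + d) rest
    | none => none

def syms_to_int_alt (syms : List Int) (big_endian : Bool) : Option Int :=
  if syms = [] then none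
  else pvHornerB 0 (if big_endian then syms else syms.reverse)

-- ===== PRECONDITION & SPEC =====
def Spec_syms_to_int (syms : List Int) (big_endian : Bool) (out : Option Int) : Prop := out = syms_to_int_alt syms big_endian
instance (syms : List Int) (big_endian : Bool) (out : Option Int) : Decidable (Spec_syms_to_int syms big_endian out) := by unfold Spec_syms_to_int; infer_instance

-- ===== CLAIM (what is proved, stated in full; the proofs are below) =====
def Claim_equal_syms_to_int : Prop := ∀ (syms : List Int) (big_endian : Bool), Dom_syms_to_int syms big_endian → Spec_syms_to_int syms big_endian (syms_to_int syms big_endian)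

-- ===== LEMMAS AND PROOFS =====

-- common characterisation: the octal digits of a symbol list, none on the first invalid symbol
def pvLookups : List Int → Option (List Int)
  | [] => some []
  | s :: rest =>
    match SYM_TO_OCT.get? s with
    | some o => (pvLookups rest).map (o :: ·)
    | none => none

theorem pvCollectA_eq (syms : List Int) : ∀ acc : List Int,
    pvCollectA acc syms = (pvLookups syms).map (acc ++ ·) := by
  induction syms with
  | nil => intro acc; simp [pvCollectA, pvLookups]
  | cons s rest ih =>
    intro acc
    simp only [pvCollectA, pvLookups]
    cases SYM_TO_OCT.get? s with
    | none => rfl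
    | some o =>
      simp only [ih (acc ++ [o])]
      cases pvLookups rest <;> simp

theorem pvHornerB_eq (l : List Int) : ∀ v : Int,
    pvHornerB v l = (pvLookups l).map (fun ds => ds.foldl (fun val o => val * 8 + o) v) := by
  induction l with
  | nil => intro v; simp [pvHornerB, pvLookups]
  | cons s rest ih =>
    intro v
    simp only [pvHornerB, pvLookups]
    cases SYM_TO_OCT.get? s with
    | none => rfl
    | some o =>
      simp only [ih (v * 8 + o)]
      cases pvLookups rest <;> simp

theorem pvLookups_reverse (l : List Int) :
    pvLookups l.reverse = (pvLookups l).map List.reverse := by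
  induction l with
  | nil => simp [pvLookups]
  | cons s rest ih =>
    have happ : ∀ (a b : List Int), pvLookups (a ++ b)
        = (pvLookups a).bind (fun xs => (pvLookups b).map (xs ++ ·)) := by
      intro a
      induction a with
      | nil => intro b; cases h : pvLookups b <;> simp [pvLookups, h]
      | cons x xs ihx =>
        intro b
        simp only [List.cons_append, pvLookups]
        cases SYM_TO_OCT.get? x with
        | none => rfl
        | some o =>
          simp only [ihx b]
          cases pvLookups xs with
          | none => rfl
          | some ys => cases pvLookups b <;> simp
    simp only [List.reverse_cons, happ, ih, pvLookups]
    cases SYM_TO_OCT.get? s with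
    | none => cases pvLookups rest <;> rfl
    | some o => cases pvLookups rest <;> simp

-- little-endian positional sum = Horner over the reversed digit list
theorem pvEnum_foldl (ds : List Int) : ∀ (s : Nat) (v : Int),
    (PySem.List.enumerate ds (s : Int)).foldl (fun val p => val + p.2 * 8 ^ p.1.toNat) v
      = v + (ds.reverse.foldl (fun val o => val * 8 + o) 0) * 8 ^ s := by
  induction ds with
  | nil => intro s v; simp [PySem.List.enumerate_nil]
  | cons d ds ih =>
    intro s v
    rw [PySem.List.enumerate_cons]
    have hcast : (s : Int) + 1 = ((s + 1 : Nat) : Int) := by push_cast; ring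
    simp only [List.foldl_cons, hcast, ih (s + 1), Int.toNat_natCast,
      List.reverse_cons, List.foldl_append, List.foldl_cons, List.foldl_nil]
    ring

theorem pvLookups_ne_nil {s : Int} {rest : List Int} {ds : List Int}
    (h : pvLookups (s :: rest) = some ds) : ds ≠ [] := by
  simp only [pvLookups] at h
  cases hg : SYM_TO_OCT.get? s <;> rw [hg] at h
  · simp at h
  · cases hr : pvLookups rest <;> rw [hr] at h <;> simp at h
    simp [← h]

-- ===== VERDICT (by name: the statement is the Claim_ definition above) =====
theorem syms_to_int_spec : Claim_equal_syms_to_int := by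
  intro syms big_endian _
  unfold Spec_syms_to_int syms_to_int syms_to_int_alt
  rw [pvCollectA_eq]
  cases syms with
  | nil => simp [pvLookups]
  | cons s rest =>
    cases big_endian with
    | true =>
      cases hl : pvLookups (s :: rest) with
      | none => simp [pvHornerB_eq, hl]
      | some ds => simp [pvHornerB_eq, hl, pvLookups_ne_nil hl]
    | false =>
      have hrev := pvLookups_reverse (s :: rest)
      cases hl : pvLookups (s :: rest) with
      | none =>
        rw [hl] at hrev
        simp only [List.reverse_cons, Option.map_none] at hrev
        simp [pvHornerB_eq, hrev]
      | some ds =>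
        rw [hl] at hrev
        simp only [List.reverse_cons, Option.map_some] at hrev
        have hne := pvLookups_ne_nil hl
        have harith := pvEnum_foldl ds 0 0
        simp only [Nat.cast_zero, pow_zero, mul_one, zero_add] at harith
        simp [pvHornerB_eq, hrev, hne, harith]
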